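-- pv_equiv track=rewrite | github.com/TheRealKoxno/zpdash | analyze_dumper.py | derive_operations
-- ===== SOURCE A (Python) =====
-- from typing import Dict, Iterable, List, Optional, Set, Tuple
--
-- def derive_operations(action_pairs: Set[str], actions: Set[str], xml_text: str) -> List[str]:
--     text = (xml_text or "").lower()
--     ops: List[str] = []
--     if "CMD_NAVIGATE" in actions:
--         ops.append("Навигация по сайтам")
--     if any(
--         a in actions
--         for a in {"RiseEvent", "TouchEvent", "KeyBoard", "SetValue", "Click", "CheckText", "SendKeys"}
--     ) or "type=\"htmlelement\"" in text:
--         ops.append("Формы/клики/DOM")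
--     if any(pair.startswith("HTTP:") for pair in action_pairs) or any(a in {"Post", "Get"} for a in actions):
--         ops.append("HTTP/API запросы")
--     if any(pair.startswith("GoogleSpreadsheets:") or pair.startswith("Table") for pair in action_pairs):
--         ops.append("Таблицы/Google Sheets")
--     if any(
--         a in actions
--         for a in {"CheckText", "Regex", "Parse", "GetText", "GetHtml", "XPath", "InnerText"}
--     ):
--         ops.append("Парсинг/валидация")
--     if any(
--         a in actions for a in {"CMD_SETPROXY", "CMD_CLEARCACHE", "CMD_CLEARCOOKIE", "Load"}
--     ) or any(pair.startswith("Profile:") or pair.startswith("ProxyChecker:") for pair in action_pairs):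
--         ops.append("Прокси/профили/эмуляция")
--     if any(a in actions for a in {"If", "IncreaseCounter", "Pause", "Switch", "Loop"}) or "counter" in text:
--         ops.append("Логика/ретраи")
--     if not ops:
--         ops.append("Прочие действия")
--     return ops
-- ===== SOURCE B (Python) =====
-- # Table-driven: invert A's per-category scans into one action->categories index.
-- LABELS = ["Навигация по сайтам", "Формы/клики/DOM", "HTTP/API запросы",
--           "Таблицы/Google Sheets", "Парсинг/валидация",
--           "Прокси/профили/эмуляция", "Логика/ретраи"]
--
-- ACTION_CATS = {
--     "CMD_NAVIGATE": (0,),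
--     "RiseEvent": (1,), "TouchEvent": (1,), "KeyBoard": (1,), "SetValue": (1,),
--     "Click": (1,), "CheckText": (1, 4), "SendKeys": (1,),
--     "Post": (2,), "Get": (2,),
--     "Regex": (4,), "Parse": (4,), "GetText": (4,), "GetHtml": (4,),
--     "XPath": (4,), "InnerText": (4,),
--     "CMD_SETPROXY": (5,), "CMD_CLEARCACHE": (5,), "CMD_CLEARCOOKIE": (5,), "Load": (5,),
--     "If": (6,), "IncreaseCounter": (6,), "Pause": (6,), "Switch": (6,), "Loop": (6,),
-- }
--
-- PREFIX_CATS = [("HTTP:", 2), ("GoogleSpreadsheets:", 3), ("Table", 3),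
--                ("Profile:", 5), ("ProxyChecker:", 5)]
--
-- TEXT_CATS = [('type="htmlelement"', 1), ("counter", 6)]
--
-- def derive_operations(action_pairs, actions, xml_text):
--     text = (xml_text or "").lower()
--     triggered = set()
--     for a in actions:
--         triggered.update(ACTION_CATS.get(a, ()))
--     for pair in action_pairs:
--         for prefix, cat in PREFIX_CATS:
--             if pair.startswith(prefix):
--                 triggered.add(cat)
--     for needle, cat in TEXT_CATS:
--         if needle in text:
--             triggered.add(cat)
--     return [lbl for i, lbl in enumerate(LABELS) if i in triggered] or ["Прочие действия"]
-- ===== Notes on version B (the rewrite author's own statement) =====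
-- stated objective: alternative
-- what changed: B is table-driven: it inverts A's per-category membership sets into one action-to-category-indices index consulted once per action, plus prefix and substring rule tables, accumulating a set of triggered category indices and then selecting the labels by index, instead of A's seven independent any()/membership scans with hard-coded append branches.
import Mathlib
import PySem

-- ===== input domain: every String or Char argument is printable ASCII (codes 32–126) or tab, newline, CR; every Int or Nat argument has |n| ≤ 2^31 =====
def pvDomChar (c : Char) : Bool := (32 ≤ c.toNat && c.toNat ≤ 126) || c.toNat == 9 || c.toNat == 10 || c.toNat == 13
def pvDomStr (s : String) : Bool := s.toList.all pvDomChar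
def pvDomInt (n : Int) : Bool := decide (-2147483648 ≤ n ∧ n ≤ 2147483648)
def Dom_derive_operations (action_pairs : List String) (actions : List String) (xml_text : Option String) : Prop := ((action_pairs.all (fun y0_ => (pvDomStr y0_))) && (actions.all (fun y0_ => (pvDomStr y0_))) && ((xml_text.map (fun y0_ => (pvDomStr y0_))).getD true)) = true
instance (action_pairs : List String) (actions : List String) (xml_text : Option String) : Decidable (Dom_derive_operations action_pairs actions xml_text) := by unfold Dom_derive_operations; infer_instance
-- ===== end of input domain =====

-- B is table-driven: one action→category-indices index consulted once per action (plus prefix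
-- and text tables), instead of A's seven independent membership/prefix scans (objective: alternative).

-- ===== PORT A =====
def derive_operations (action_pairs : List String) (actions : List String) (xml_text : Option String) : List String :=
  let text := PySem.Str.lower (xml_text.getD "")
  let ops : List String := []
  let ops := if actions.contains "CMD_NAVIGATE" then ops ++ ["Навигация по сайтам"] else ops
  let ops := if (["RiseEvent", "TouchEvent", "KeyBoard", "SetValue", "Click", "CheckText", "SendKeys"].any (fun a => actions.contains a)) || PySem.Str.isIn "type=\"htmlelement\"" text then ops ++ ["Формы/клики/DOM"] else ops
  let ops := if (action_pairs.any (fun pair => PySem.Str.startswith pair "HTTP:")) || (["Post", "Get"].any (fun a => actions.contains a)) then ops ++ ["HTTP/API запросы"] else ops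
  let ops := if action_pairs.any (fun pair => PySem.Str.startswith pair "GoogleSpreadsheets:" || PySem.Str.startswith pair "Table") then ops ++ ["Таблицы/Google Sheets"] else ops
  let ops := if ["CheckText", "Regex", "Parse", "GetText", "GetHtml", "XPath", "InnerText"].any (fun a => actions.contains a) then ops ++ ["Парсинг/валидация"] else ops
  let ops := if (["CMD_SETPROXY", "CMD_CLEARCACHE", "CMD_CLEARCOOKIE", "Load"].any (fun a => actions.contains a)) || (action_pairs.any (fun pair => PySem.Str.startswith pair "Profile:" || PySem.Str.startswith pair "ProxyChecker:")) then ops ++ ["Прокси/профили/эмуляция"] else ops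
  let ops := if (["If", "IncreaseCounter", "Pause", "Switch", "Loop"].any (fun a => actions.contains a)) || PySem.Str.isIn "counter" text then ops ++ ["Логика/ретраи"] else ops
  let ops := if ops = [] then ops ++ ["Прочие действия"] else ops
  ops

-- ===== PORT B =====
def pvLabels : List String := ["Навигация по сайтам", "Формы/клики/DOM", "HTTP/API запросы", "Таблицы/Google Sheets", "Парсинг/валидация", "Прокси/профили/эмуляция", "Логика/ретраи"]

def pvActionCats : PySem.Dict String (List Int) := PySem.Dict.mk [
  ("CMD_NAVIGATE", [0]),
  ("RiseEvent", [1]), ("TouchEvent", [1]), ("KeyBoard", [1]), ("SetValue", [1]),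
  ("Click", [1]), ("CheckText", [1, 4]), ("SendKeys", [1]),
  ("Post", [2]), ("Get", [2]),
  ("Regex", [4]), ("Parse", [4]), ("GetText", [4]), ("GetHtml", [4]),
  ("XPath", [4]), ("InnerText", [4]),
  ("CMD_SETPROXY", [5]), ("CMD_CLEARCACHE", [5]), ("CMD_CLEARCOOKIE", [5]), ("Load", [5]),
  ("If", [6]), ("IncreaseCounter", [6]), ("Pause", [6]), ("Switch", [6]), ("Loop", [6])]

def pvPrefixCats : List (String × Int) := [("HTTP:", 2), ("GoogleSpreadsheets:", 3), ("Table", 3), ("Profile:", 5), ("ProxyChecker:", 5)]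

def pvTextCats : List (String × Int) := [("type=\"htmlelement\"", 1), ("counter", 6)]

-- ACTION_CATS.get(a, ())
def pvCats (a : String) : List Int := PySem.Dict.getD pvActionCats a []

-- the three accumulation loops of Source B building the 'triggered' set
def pvTrig (action_pairs : List String) (actions : List String) (text : String) : PySem.Set Int :=
  let t := actions.foldl (fun s a => PySem.Set.update s (pvCats a)) PySem.Set.empty
  let t := action_pairs.foldl (fun s pair => pvPrefixCats.foldl (fun s pc => if PySem.Str.startswith pair pc.1 then PySem.Set.add s pc.2 else s) s) t
  pvTextCats.foldl (fun s tc => if PySem.Str.isIn tc.1 text then PySem.Set.add s tc.2 else s) t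

def derive_operations_alt (action_pairs : List String) (actions : List String) (xml_text : Option String) : List String :=
  let text := PySem.Str.lower (xml_text.getD "")
  let t := pvTrig action_pairs actions text
  let res := ((PySem.List.enumerate pvLabels).filter (fun il => PySem.Set.contains t il.1)).map Prod.snd
  if res.isEmpty then ["Прочие действия"] else res

-- ===== PRECONDITION & SPEC =====
def Spec_derive_operations (action_pairs : List String) (actions : List String) (xml_text : Option String) (out : List String) : Prop := out = derive_operations_alt action_pairs actions xml_text
instance (action_pairs : List String) (actions : List String) (xml_text : Option String) (out : List String) : Decidable (Spec_derive_operations action_pairs actions xml_text out) := by unfold Spec_derive_operations; infer_instance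

-- ===== CLAIM (what is proved, stated in full; the proofs are below) =====
def Claim_equal_derive_operations : Prop := ∀ (action_pairs : List String) (actions : List String) (xml_text : Option String), Dom_derive_operations action_pairs actions xml_text → Spec_derive_operations action_pairs actions xml_text (derive_operations action_pairs actions xml_text)

-- ===== LEMMAS AND PROOFS =====

theorem mem_foldl_update (xs : List String) (s : PySem.Set Int) (i : Int) :
    (i ∈ xs.foldl (fun s a => PySem.Set.update s (pvCats a)) s) ↔ i ∈ s ∨ ∃ a ∈ xs, i ∈ pvCats a := by
  induction xs generalizing s with
  | nil => simp
  | cons x t ih => simp [List.foldl_cons, ih, PySem.Set.mem_update]; tauto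

theorem mem_foldl_condadd {γ : Type} (l : List γ) (c : γ → Bool) (v : γ → Int) (s : PySem.Set Int) (i : Int) :
    (i ∈ l.foldl (fun s x => if c x then PySem.Set.add s (v x) else s) s) ↔ i ∈ s ∨ ∃ x ∈ l, c x ∧ i = v x := by
  induction l generalizing s with
  | nil => simp
  | cons x t ih =>
    simp only [List.foldl_cons]
    by_cases h : c x = true
    · simp [h, ih, PySem.Set.mem_add]; tauto
    · simp only [h, if_false, ih, List.mem_cons]
      constructor
      · rintro (hs | ⟨y, hy, hc, hv⟩)
        · exact Or.inl hs
        · exact Or.inr ⟨y, Or.inr hy, hc, hv⟩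
      · rintro (hs | ⟨y, (rfl | hy), hc, hv⟩)
        · exact Or.inl hs
        · exact absurd hc h
        · exact Or.inr ⟨y, hy, hc, hv⟩

theorem mem_pairs_fold (pairs : List String) (s : PySem.Set Int) (i : Int) :
    (i ∈ pairs.foldl (fun s pair => pvPrefixCats.foldl (fun s pc => if PySem.Str.startswith pair pc.1 then PySem.Set.add s pc.2 else s) s) s)
    ↔ i ∈ s ∨ ∃ pair ∈ pairs, ∃ pc ∈ pvPrefixCats, PySem.Str.startswith pair pc.1 ∧ i = pc.2 := by
  induction pairs generalizing s with
  | nil => simp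
  | cons p t ih =>
    simp only [List.foldl_cons, ih, mem_foldl_condadd, List.mem_cons]
    constructor
    · rintro (⟨hs | ⟨pc, hpc, hc, hv⟩⟩ | ⟨q, hq, pc, hpc, hc, hv⟩)
      · exact Or.inl hs
      · exact Or.inr ⟨p, Or.inl rfl, pc, hpc, hc, hv⟩
      · exact Or.inr ⟨q, Or.inr hq, pc, hpc, hc, hv⟩
    · rintro (hs | ⟨q, (rfl | hq), pc, hpc, hc, hv⟩)
      · exact Or.inl (Or.inl hs)
      · exact Or.inl (Or.inr ⟨pc, hpc, hc, hv⟩)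
      · exact Or.inr ⟨q, hq, pc, hpc, hc, hv⟩

theorem mem_trig (action_pairs actions : List String) (text : String) (i : Int) :
    (i ∈ pvTrig action_pairs actions text) ↔
      (∃ a ∈ actions, i ∈ pvCats a)
      ∨ (∃ pair ∈ action_pairs, ∃ pc ∈ pvPrefixCats, PySem.Str.startswith pair pc.1 ∧ i = pc.2)
      ∨ (∃ tc ∈ pvTextCats, PySem.Str.isIn tc.1 text ∧ i = tc.2) := by
  unfold pvTrig
  rw [mem_foldl_condadd, mem_pairs_fold, mem_foldl_update]
  simp [PySem.Set.empty]
  rw [or_assoc]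

theorem cats0 (a : String) : ((0:Int) ∈ pvCats a) ↔ a ∈ ["CMD_NAVIGATE"] := by
  by_cases h : pvActionCats.contains a = true
  · simp only [pvActionCats, PySem.Dict.contains_mk, List.any_eq_true, List.mem_cons, beq_iff_eq] at h
    obtain ⟨x, hx, rfl⟩ := h
    rcases hx with rfl|rfl|rfl|rfl|rfl|rfl|rfl|rfl|rfl|rfl|rfl|rfl|rfl|rfl|rfl|rfl|rfl|rfl|rfl|rfl|rfl|rfl|rfl|rfl|rfl|h' <;> first | decide | simp_all
  · rw [pvCats, PySem.Dict.getD_of_not_contains _ _ (by simpa using h)]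
    simp only [pvActionCats, PySem.Dict.contains_mk, List.any_eq_true, List.mem_cons, beq_iff_eq] at h
    push_neg at h
    have hg0 := h ("CMD_NAVIGATE", [0]); simp at hg0
    simp only [List.mem_cons, List.not_mem_nil, false_iff, or_false]
    push_neg
    exact fun hh => hg0 hh.symm

theorem cats1 (a : String) : ((1:Int) ∈ pvCats a) ↔ a ∈ ["RiseEvent", "TouchEvent", "KeyBoard", "SetValue", "Click", "CheckText", "SendKeys"] := by
  by_cases h : pvActionCats.contains a = true
  · simp only [pvActionCats, PySem.Dict.contains_mk, List.any_eq_true, List.mem_cons, beq_iff_eq] at h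
    obtain ⟨x, hx, rfl⟩ := h
    rcases hx with rfl|rfl|rfl|rfl|rfl|rfl|rfl|rfl|rfl|rfl|rfl|rfl|rfl|rfl|rfl|rfl|rfl|rfl|rfl|rfl|rfl|rfl|rfl|rfl|rfl|h' <;> first | decide | simp_all
  · rw [pvCats, PySem.Dict.getD_of_not_contains _ _ (by simpa using h)]
    simp only [pvActionCats, PySem.Dict.contains_mk, List.any_eq_true, List.mem_cons, beq_iff_eq] at h
    push_neg at h
    have hg0 := h ("RiseEvent", [1]); simp at hg0
    have hg1 := h ("TouchEvent", [1]); simp at hg1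
    have hg2 := h ("KeyBoard", [1]); simp at hg2
    have hg3 := h ("SetValue", [1]); simp at hg3
    have hg4 := h ("Click", [1]); simp at hg4
    have hg5 := h ("CheckText", [1, 4]); simp at hg5
    have hg6 := h ("SendKeys", [1]); simp at hg6
    simp only [List.mem_cons, List.not_mem_nil, false_iff, or_false]
    push_neg
    exact ⟨fun hh => hg0 hh.symm, fun hh => hg1 hh.symm, fun hh => hg2 hh.symm, fun hh => hg3 hh.symm, fun hh => hg4 hh.symm, fun hh => hg5 hh.symm, fun hh => hg6 hh.symm⟩

theorem cats2 (a : String) : ((2:Int) ∈ pvCats a) ↔ a ∈ ["Post", "Get"] := by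
  by_cases h : pvActionCats.contains a = true
  · simp only [pvActionCats, PySem.Dict.contains_mk, List.any_eq_true, List.mem_cons, beq_iff_eq] at h
    obtain ⟨x, hx, rfl⟩ := h
    rcases hx with rfl|rfl|rfl|rfl|rfl|rfl|rfl|rfl|rfl|rfl|rfl|rfl|rfl|rfl|rfl|rfl|rfl|rfl|rfl|rfl|rfl|rfl|rfl|rfl|rfl|h' <;> first | decide | simp_all
  · rw [pvCats, PySem.Dict.getD_of_not_contains _ _ (by simpa using h)]
    simp only [pvActionCats, PySem.Dict.contains_mk, List.any_eq_true, List.mem_cons, beq_iff_eq] at h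
    push_neg at h
    have hg0 := h ("Post", [2]); simp at hg0
    have hg1 := h ("Get", [2]); simp at hg1
    simp only [List.mem_cons, List.not_mem_nil, false_iff, or_false]
    push_neg
    exact ⟨fun hh => hg0 hh.symm, fun hh => hg1 hh.symm⟩

theorem cats4 (a : String) : ((4:Int) ∈ pvCats a) ↔ a ∈ ["CheckText", "Regex", "Parse", "GetText", "GetHtml", "XPath", "InnerText"] := by
  by_cases h : pvActionCats.contains a = true
  · simp only [pvActionCats, PySem.Dict.contains_mk, List.any_eq_true, List.mem_cons, beq_iff_eq] at h
    obtain ⟨x, hx, rfl⟩ := h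
    rcases hx with rfl|rfl|rfl|rfl|rfl|rfl|rfl|rfl|rfl|rfl|rfl|rfl|rfl|rfl|rfl|rfl|rfl|rfl|rfl|rfl|rfl|rfl|rfl|rfl|rfl|h' <;> first | decide | simp_all
  · rw [pvCats, PySem.Dict.getD_of_not_contains _ _ (by simpa using h)]
    simp only [pvActionCats, PySem.Dict.contains_mk, List.any_eq_true, List.mem_cons, beq_iff_eq] at h
    push_neg at h
    have hg0 := h ("CheckText", [1, 4]); simp at hg0
    have hg1 := h ("Regex", [4]); simp at hg1
    have hg2 := h ("Parse", [4]); simp at hg2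
    have hg3 := h ("GetText", [4]); simp at hg3
    have hg4 := h ("GetHtml", [4]); simp at hg4
    have hg5 := h ("XPath", [4]); simp at hg5
    have hg6 := h ("InnerText", [4]); simp at hg6
    simp only [List.mem_cons, List.not_mem_nil, false_iff, or_false]
    push_neg
    exact ⟨fun hh => hg0 hh.symm, fun hh => hg1 hh.symm, fun hh => hg2 hh.symm, fun hh => hg3 hh.symm, fun hh => hg4 hh.symm, fun hh => hg5 hh.symm, fun hh => hg6 hh.symm⟩

theorem cats5 (a : String) : ((5:Int) ∈ pvCats a) ↔ a ∈ ["CMD_SETPROXY", "CMD_CLEARCACHE", "CMD_CLEARCOOKIE", "Load"] := by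
  by_cases h : pvActionCats.contains a = true
  · simp only [pvActionCats, PySem.Dict.contains_mk, List.any_eq_true, List.mem_cons, beq_iff_eq] at h
    obtain ⟨x, hx, rfl⟩ := h
    rcases hx with rfl|rfl|rfl|rfl|rfl|rfl|rfl|rfl|rfl|rfl|rfl|rfl|rfl|rfl|rfl|rfl|rfl|rfl|rfl|rfl|rfl|rfl|rfl|rfl|rfl|h' <;> first | decide | simp_all
  · rw [pvCats, PySem.Dict.getD_of_not_contains _ _ (by simpa using h)]
    simp only [pvActionCats, PySem.Dict.contains_mk, List.any_eq_true, List.mem_cons, beq_iff_eq] at h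
    push_neg at h
    have hg0 := h ("CMD_SETPROXY", [5]); simp at hg0
    have hg1 := h ("CMD_CLEARCACHE", [5]); simp at hg1
    have hg2 := h ("CMD_CLEARCOOKIE", [5]); simp at hg2
    have hg3 := h ("Load", [5]); simp at hg3
    simp only [List.mem_cons, List.not_mem_nil, false_iff, or_false]
    push_neg
    exact ⟨fun hh => hg0 hh.symm, fun hh => hg1 hh.symm, fun hh => hg2 hh.symm, fun hh => hg3 hh.symm⟩

theorem cats6 (a : String) : ((6:Int) ∈ pvCats a) ↔ a ∈ ["If", "IncreaseCounter", "Pause", "Switch", "Loop"] := by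
  by_cases h : pvActionCats.contains a = true
  · simp only [pvActionCats, PySem.Dict.contains_mk, List.any_eq_true, List.mem_cons, beq_iff_eq] at h
    obtain ⟨x, hx, rfl⟩ := h
    rcases hx with rfl|rfl|rfl|rfl|rfl|rfl|rfl|rfl|rfl|rfl|rfl|rfl|rfl|rfl|rfl|rfl|rfl|rfl|rfl|rfl|rfl|rfl|rfl|rfl|rfl|h' <;> first | decide | simp_all
  · rw [pvCats, PySem.Dict.getD_of_not_contains _ _ (by simpa using h)]
    simp only [pvActionCats, PySem.Dict.contains_mk, List.any_eq_true, List.mem_cons, beq_iff_eq] at h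
    push_neg at h
    have hg0 := h ("If", [6]); simp at hg0
    have hg1 := h ("IncreaseCounter", [6]); simp at hg1
    have hg2 := h ("Pause", [6]); simp at hg2
    have hg3 := h ("Switch", [6]); simp at hg3
    have hg4 := h ("Loop", [6]); simp at hg4
    simp only [List.mem_cons, List.not_mem_nil, false_iff, or_false]
    push_neg
    exact ⟨fun hh => hg0 hh.symm, fun hh => hg1 hh.symm, fun hh => hg2 hh.symm, fun hh => hg3 hh.symm, fun hh => hg4 hh.symm⟩

theorem cats3 (a : String) : ¬ ((3:Int) ∈ pvCats a) := by
  by_cases h : pvActionCats.contains a = true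
  · simp only [pvActionCats, PySem.Dict.contains_mk, List.any_eq_true, List.mem_cons, beq_iff_eq] at h
    obtain ⟨x, hx, rfl⟩ := h
    rcases hx with rfl|rfl|rfl|rfl|rfl|rfl|rfl|rfl|rfl|rfl|rfl|rfl|rfl|rfl|rfl|rfl|rfl|rfl|rfl|rfl|rfl|rfl|rfl|rfl|rfl|h' <;> first | decide | simp_all
  · rw [pvCats, PySem.Dict.getD_of_not_contains _ _ (by simpa using h)]
    simp

theorem ex_or_split {α : Type} (xs : List α) (c : α) (q : α → Prop) :
    (∃ a ∈ xs, a = c ∨ q a) ↔ c ∈ xs ∨ ∃ a ∈ xs, q a := by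
  constructor
  · rintro ⟨a, ha, rfl | hq⟩
    · exact Or.inl ha
    · exact Or.inr ⟨a, ha, hq⟩
  · rintro (hc | ⟨a, ha, hq⟩)
    · exact ⟨c, hc, Or.inl rfl⟩
    · exact ⟨a, ha, Or.inr hq⟩

theorem ex_eq_mem {α : Type} (xs : List α) (c : α) : (∃ a ∈ xs, a = c) ↔ c ∈ xs := by
  constructor
  · rintro ⟨a, ha, rfl⟩; exact ha
  · intro h; exact ⟨c, h, rfl⟩

theorem contains_trig (action_pairs actions : List String) (text : String) (i : Int) :
    PySem.Set.contains (pvTrig action_pairs actions text) i = true ↔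
      (∃ a ∈ actions, i ∈ pvCats a)
      ∨ (∃ pair ∈ action_pairs, ∃ pc ∈ pvPrefixCats, PySem.Str.startswith pair pc.1 ∧ i = pc.2)
      ∨ (∃ tc ∈ pvTextCats, PySem.Str.isIn tc.1 text ∧ i = tc.2) := by
  rw [PySem.Set.contains_iff, mem_trig]

theorem h0' (action_pairs actions : List String) (text : String) :
    PySem.Set.contains (pvTrig action_pairs actions text) 0 = actions.contains "CMD_NAVIGATE" := by
  rw [Bool.eq_iff_iff, contains_trig]
  simp [pvPrefixCats, pvTextCats, cats0, ex_or_split, ex_eq_mem]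

theorem h1' (action_pairs actions : List String) (text : String) :
    PySem.Set.contains (pvTrig action_pairs actions text) 1 = ((["RiseEvent", "TouchEvent", "KeyBoard", "SetValue", "Click", "CheckText", "SendKeys"].any (fun a => actions.contains a)) || PySem.Str.isIn "type=\"htmlelement\"" text) := by
  rw [Bool.eq_iff_iff, contains_trig]
  simp [pvPrefixCats, pvTextCats, cats1, ex_or_split, ex_eq_mem]

theorem h2' (action_pairs actions : List String) (text : String) :
    PySem.Set.contains (pvTrig action_pairs actions text) 2 = ((action_pairs.any (fun pair => PySem.Str.startswith pair "HTTP:")) || (["Post", "Get"].any (fun a => actions.contains a))) := by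
  rw [Bool.eq_iff_iff, contains_trig]
  simp [pvPrefixCats, pvTextCats, cats2, ex_or_split, ex_eq_mem]
  exact or_comm

theorem h3' (action_pairs actions : List String) (text : String) :
    PySem.Set.contains (pvTrig action_pairs actions text) 3 = (action_pairs.any (fun pair => PySem.Str.startswith pair "GoogleSpreadsheets:" || PySem.Str.startswith pair "Table")) := by
  rw [Bool.eq_iff_iff, contains_trig]
  simp [pvPrefixCats, pvTextCats, cats3, ex_or_split, ex_eq_mem]

theorem h4' (action_pairs actions : List String) (text : String) :
    PySem.Set.contains (pvTrig action_pairs actions text) 4 = (["CheckText", "Regex", "Parse", "GetText", "GetHtml", "XPath", "InnerText"].any (fun a => actions.contains a)) := by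
  rw [Bool.eq_iff_iff, contains_trig]
  simp [pvPrefixCats, pvTextCats, cats4, ex_or_split, ex_eq_mem]

theorem h5' (action_pairs actions : List String) (text : String) :
    PySem.Set.contains (pvTrig action_pairs actions text) 5 = ((["CMD_SETPROXY", "CMD_CLEARCACHE", "CMD_CLEARCOOKIE", "Load"].any (fun a => actions.contains a)) || (action_pairs.any (fun pair => PySem.Str.startswith pair "Profile:" || PySem.Str.startswith pair "ProxyChecker:"))) := by
  rw [Bool.eq_iff_iff, contains_trig]
  simp [pvPrefixCats, pvTextCats, cats5, ex_or_split, ex_eq_mem]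

theorem h6' (action_pairs actions : List String) (text : String) :
    PySem.Set.contains (pvTrig action_pairs actions text) 6 = ((["If", "IncreaseCounter", "Pause", "Switch", "Loop"].any (fun a => actions.contains a)) || PySem.Str.isIn "counter" text) := by
  rw [Bool.eq_iff_iff, contains_trig]
  simp [pvPrefixCats, pvTextCats, cats6, ex_or_split, ex_eq_mem]

-- ===== VERDICT (by name: the statement is the Claim_ definition above) =====
set_option maxHeartbeats 2000000 in
theorem derive_operations_spec : Claim_equal_derive_operations := by
  intro action_pairs actions xml_text _
  unfold Spec_derive_operations derive_operations derive_operations_alt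
  simp only [pvLabels, PySem.List.enumerate_cons, PySem.List.enumerate_nil, List.filter, Int.reduceAdd]
  rw [h0', h1', h2', h3', h4', h5', h6']
  generalize PySem.Str.lower (xml_text.getD "") = text
  generalize actions.contains "CMD_NAVIGATE" = c1
  generalize (["RiseEvent", "TouchEvent", "KeyBoard", "SetValue", "Click", "CheckText", "SendKeys"].any (fun a => actions.contains a) || PySem.Str.isIn "type=\"htmlelement\"" text) = c2
  generalize (action_pairs.any (fun pair => PySem.Str.startswith pair "HTTP:") || ["Post", "Get"].any (fun a => actions.contains a)) = c3
  generalize action_pairs.any (fun pair => PySem.Str.startswith pair "GoogleSpreadsheets:" || PySem.Str.startswith pair "Table") = c4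
  generalize ["CheckText", "Regex", "Parse", "GetText", "GetHtml", "XPath", "InnerText"].any (fun a => actions.contains a) = c5
  generalize (["CMD_SETPROXY", "CMD_CLEARCACHE", "CMD_CLEARCOOKIE", "Load"].any (fun a => actions.contains a) || action_pairs.any (fun pair => PySem.Str.startswith pair "Profile:" || PySem.Str.startswith pair "ProxyChecker:")) = c6
  generalize (["If", "IncreaseCounter", "Pause", "Switch", "Loop"].any (fun a => actions.contains a) || PySem.Str.isIn "counter" text) = c7
  cases c1 <;> cases c2 <;> cases c3 <;> cases c4 <;> cases c5 <;> cases c6 <;> cases c7 <;> rfl
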